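-- pv_equiv track=rewrite | github.com/djcroissant/toy_problems | sum_multiples/sum_multiples.py | sum_multiples
-- ===== SOURCE A (Python) =====
-- def sum_multiples(limit, numbers):
--     numbers = set(numbers)      # take unique values and sort ascending
--     multiples = []
--     while numbers != set():
--         number = numbers.pop()
--         multiplier = 1
--         multiple = number * multiplier
--         while multiple < limit:
--             if multiple not in multiples:
--                 multiples.append(multiple)
--             if multiple in numbers:
--                 numbers.remove(multiple)
--             multiplier += 1
--             multiple = number * multiplier
--     return sum(multiples)
-- ===== SOURCE B (Python) =====
-- def sum_multiples(limit, numbers):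
--     return sum(n for n in range(1, limit) if any(n % d == 0 for d in numbers))
-- ===== Notes on version B (the rewrite author's own statement) =====
-- stated objective: alternative
-- what changed: Instead of enumerating the multiples of each number and deduplicating them into a list with linear membership scans, B makes one pass over the candidate integers 1..limit-1 and sums those divisible by some given number, so distinctness is automatic.
import Mathlib
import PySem

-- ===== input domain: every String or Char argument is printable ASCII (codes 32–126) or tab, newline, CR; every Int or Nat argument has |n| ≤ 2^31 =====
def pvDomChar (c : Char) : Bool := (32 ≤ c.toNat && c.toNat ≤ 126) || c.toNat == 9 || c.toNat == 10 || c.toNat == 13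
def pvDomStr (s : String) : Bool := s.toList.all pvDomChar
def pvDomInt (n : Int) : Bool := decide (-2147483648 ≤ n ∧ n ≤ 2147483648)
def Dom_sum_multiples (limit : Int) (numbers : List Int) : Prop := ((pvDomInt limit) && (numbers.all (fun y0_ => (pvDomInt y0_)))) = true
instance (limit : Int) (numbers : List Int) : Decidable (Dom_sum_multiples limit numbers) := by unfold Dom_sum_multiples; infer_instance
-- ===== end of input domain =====

-- B replaces A's per-number multiple enumeration (with list-scan dedup) by a single
-- scan over the integers 1..limit-1 summing those divisible by some given number.
-- A mutates nothing observable; equivalence is about the return value on inputs where A terminates.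


-- ===== PORT A =====
-- inner while loop of A; the fuel only makes the recursion total (on Pre_ it never runs out)
def sumMultiplesInner (limit number : Int) : Nat → Int → List Int × PySem.Set Int → List Int × PySem.Set Int
  | 0, _, st => st
  | fuel+1, multiplier, (multiples, numbers) =>
    let multiple := number * multiplier
    if multiple < limit then
      let multiples := if multiple ∈ multiples then multiples else multiples ++ [multiple]
      let numbers := if PySem.Set.contains numbers multiple then PySem.Set.discard numbers multiple else numbers
      sumMultiplesInner limit number fuel (multiplier + 1) (multiples, numbers)
    else (multiples, numbers)

-- outer while loop of A; set.pop is taken at the head (the returned sum is order-independent)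
def sumMultiplesOuter (limit : Int) : Nat → PySem.Set Int → List Int → List Int
  | 0, _, multiples => multiples
  | fuel+1, numbers, multiples =>
    match numbers with
    | [] => multiples
    | number :: rest =>
      let st := sumMultiplesInner limit number (limit.toNat + 1) 1 (multiples, rest)
      sumMultiplesOuter limit fuel st.2 st.1

def sum_multiples (limit : Int) (numbers : List Int) : Int :=
  let s := PySem.Set.ofList numbers
  (sumMultiplesOuter limit s.length s []).sum

-- ===== PORT B =====
def sum_multiples_alt (limit : Int) (numbers : List Int) : Int :=
  (PySem.List.pyRange 1 limit 1).foldl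
    (fun acc n => if numbers.any (fun d => PySem.Int.mod n d == 0) then acc + n else acc) 0

-- ===== PRECONDITION & SPEC =====
-- Pre_ excludes exactly the inputs on which A never returns (infinite loop): any number d
-- with d ≤ 0 and d < limit makes A's inner while loop run forever.
def Pre_sum_multiples (limit : Int) (numbers : List Int) : Prop :=
  ∀ d ∈ numbers, 0 < d ∨ limit ≤ d
instance (limit : Int) (numbers : List Int) : Decidable (Pre_sum_multiples limit numbers) := by unfold Pre_sum_multiples; infer_instance

def pvWitness_sum_multiples : Int × List Int := (10, [3, 5])

def Spec_sum_multiples (limit : Int) (numbers : List Int) (out : Int) : Prop := out = sum_multiples_alt limit numbers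
instance (limit : Int) (numbers : List Int) (out : Int) : Decidable (Spec_sum_multiples limit numbers out) := by unfold Spec_sum_multiples; infer_instance

-- ===== CLAIM (what is proved, stated in full; the proofs are below) =====
def Claim_equal_sum_multiples : Prop := ∀ (limit : Int) (numbers : List Int), Dom_sum_multiples limit numbers → Pre_sum_multiples limit numbers → Spec_sum_multiples limit numbers (sum_multiples limit numbers)

-- ===== LEMMAS AND PROOFS =====

-- n is a multiple (at least 1×) of d lying below limit
def IsMult (limit d n : Int) : Prop := ∃ k : Int, 1 ≤ k ∧ n = d * k ∧ n < limit

-- with limit ≤ number the inner loop exits at once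
lemma inner_noop (limit number : Int) (h : limit ≤ number) (fuel : Nat) (st : List Int × PySem.Set Int) :
    sumMultiplesInner limit number (fuel + 1) 1 st = st := by
  obtain ⟨a, b⟩ := st
  simp [sumMultiplesInner]
  intro h'
  exact absurd h' (by omega)

-- B's sum-of-generator loop is the sum of the filtered list
lemma foldl_if_filter (p : Int → Bool) :
    ∀ (l : List Int) (acc : Int),
      l.foldl (fun acc n => if p n then acc + n else acc) acc = acc + (l.filter p).sum := by
  intro l
  induction l with
  | nil => simp
  | cons x xs ih =>
    intro acc
    by_cases h : p x <;> simp [List.foldl_cons, h, ih] <;> ring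

-- the inner loop: adds to `multiples` exactly the multiples number*k (k ≥ multiplier) below
-- limit, keeps it duplicate-free, and removes only such multiples from the remaining set
lemma innerA_spec (limit number : Int) (hnum : 1 ≤ number) :
    ∀ (fuel : Nat) (m : Int) (multiples numbers : List Int),
      limit ≤ number * (m + fuel) →
      (multiples.Nodup → (sumMultiplesInner limit number fuel m (multiples, numbers)).1.Nodup) ∧
      (∀ n, n ∈ (sumMultiplesInner limit number fuel m (multiples, numbers)).1 ↔
        n ∈ multiples ∨ (∃ k, m ≤ k ∧ n = number * k ∧ n < limit)) ∧
      (∀ n, n ∈ (sumMultiplesInner limit number fuel m (multiples, numbers)).2 → n ∈ numbers) ∧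
      (∀ n, n ∈ numbers → n ∉ (sumMultiplesInner limit number fuel m (multiples, numbers)).2 →
        (∃ k, m ≤ k ∧ n = number * k ∧ n < limit)) ∧
      (sumMultiplesInner limit number fuel m (multiples, numbers)).2.length ≤ numbers.length := by
  intro fuel
  induction fuel with
  | zero =>
    intro m multiples numbers hfuel
    simp only [sumMultiplesInner]
    refine ⟨fun h => h, ?_, fun n h => h, ?_, le_refl _⟩
    · intro n
      constructor
      · intro h; exact Or.inl h
      · rintro (h | ⟨k, hk, rfl, hlt⟩)
        · exact h
        · exfalso
          have : number * m ≤ number * k := by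
            exact mul_le_mul_of_nonneg_left hk (by omega)
          simp at hfuel
          omega
    · intro n hn hn2; exact absurd hn hn2
  | succ fuel ih =>
    intro m multiples numbers hfuel
    by_cases hlt : number * m < limit
    · have hfuel' : limit ≤ number * ((m + 1) + fuel) := by
        have : number * ((m+1) + fuel) = number * (m + (fuel+1)) := by ring
        rw [this]; exact_mod_cast hfuel
      set multiples' := if number * m ∈ multiples then multiples else multiples ++ [number * m] with hm'
      set numbers' := if PySem.Set.contains numbers (number * m) then PySem.Set.discard numbers (number * m) else numbers with hn'
      have hstep : sumMultiplesInner limit number (fuel+1) m (multiples, numbers)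
          = sumMultiplesInner limit number fuel (m+1) (multiples', numbers') := by
        simp only [sumMultiplesInner, hlt, if_pos, hm', hn']
      obtain ⟨h1, h2, h3, h4, h5⟩ := ih (m+1) multiples' numbers' hfuel'
      rw [hstep]
      have hmem' : ∀ n, n ∈ multiples' ↔ n ∈ multiples ∨ n = number * m := by
        intro n; rw [hm']; split_ifs with h
        · constructor
          · exact Or.inl
          · rintro (h' | rfl) <;> [exact h'; exact h]
        · simp
      have hnodup' : multiples.Nodup → multiples'.Nodup := by
        intro hd; rw [hm']; split_ifs with h
        · exact hd
        · simp [List.nodup_append, hd]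
          intro a ha hae
          exact h (hae ▸ ha)
      have hnmem' : ∀ n, n ∈ numbers' → n ∈ numbers := by
        intro n hn; rw [hn'] at hn; split_ifs at hn with h
        · exact (PySem.Set.mem_discard _ _ _).mp hn |>.1
        · exact hn
      have hnlen' : numbers'.length ≤ numbers.length := by
        rw [hn']; split_ifs with h
        · exact List.length_filter_le _ _
        · exact le_refl _
      have hnrem' : ∀ n, n ∈ numbers → n ∉ numbers' → n = number * m := by
        intro n hn hnot; rw [hn'] at hnot; split_ifs at hnot with h
        · by_contra hne
          exact hnot ((PySem.Set.mem_discard _ _ _).mpr ⟨hn, hne⟩)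
        · exact absurd hn hnot
      refine ⟨fun hd => h1 (hnodup' hd), ?_, fun n hn => hnmem' n (h3 n hn), ?_, le_trans h5 hnlen'⟩
      · intro n
        rw [h2 n, hmem' n]
        constructor
        · rintro ((h | rfl) | ⟨k, hk, rfl, hl⟩)
          · exact Or.inl h
          · exact Or.inr ⟨m, le_refl m, rfl, hlt⟩
          · exact Or.inr ⟨k, by omega, rfl, hl⟩
        · rintro (h | ⟨k, hk, rfl, hl⟩)
          · exact Or.inl (Or.inl h)
          · rcases eq_or_lt_of_le hk with rfl | hk'
            · exact Or.inl (Or.inr rfl)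
            · exact Or.inr ⟨k, by omega, rfl, hl⟩
      · intro n hn hnot
        by_cases h : n ∈ numbers'
        · obtain ⟨k, hk, rfl, hl⟩ := h4 n h hnot
          exact ⟨k, by omega, rfl, hl⟩
        · have := hnrem' n hn h
          exact ⟨m, le_refl m, this, by omega⟩
    · simp only [sumMultiplesInner, hlt, if_neg, not_false_iff]
      refine ⟨fun h => h, ?_, fun n h => h, fun n hn hn2 => absurd hn hn2, le_refl _⟩
      intro n
      constructor
      · exact Or.inl
      · rintro (h | ⟨k, hk, rfl, hl⟩)
        · exact h
        · exfalso
          have : number * m ≤ number * k := mul_le_mul_of_nonneg_left hk (by omega)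
          omega

-- with every remaining number ≥ limit, the outer loop only drains the set
lemma outer_drain (limit : Int) :
    ∀ (fuel : Nat) (s multiples : List Int), (∀ d ∈ s, limit ≤ d) →
      sumMultiplesOuter limit fuel s multiples = multiples := by
  intro fuel
  induction fuel with
  | zero => intro s multiples _; simp [sumMultiplesOuter]
  | succ fuel ih =>
    intro s multiples hs
    match s with
    | [] => simp [sumMultiplesOuter]
    | number :: rest =>
      simp only [sumMultiplesOuter]
      rw [inner_noop limit number (hs number (by simp)) limit.toNat (multiples, rest)]
      exact ih rest multiples (fun d hd => hs d (by simp [hd]))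

-- the outer loop (positive numbers): result is duplicate-free and holds exactly the
-- multiples below limit of the numbers still in the set, plus what was collected before
lemma outerA_spec (limit : Int) :
    ∀ (fuel : Nat) (s multiples : List Int),
      s.length ≤ fuel → (∀ d ∈ s, 1 ≤ d) → multiples.Nodup →
      (sumMultiplesOuter limit fuel s multiples).Nodup ∧
      (∀ n, n ∈ sumMultiplesOuter limit fuel s multiples ↔
        n ∈ multiples ∨ ∃ d ∈ s, IsMult limit d n) := by
  intro fuel
  induction fuel with
  | zero =>
    intro s multiples hlen hpos hnd
    have : s = [] := List.length_eq_zero_iff.mp (Nat.le_zero.mp hlen)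
    subst this
    simp [sumMultiplesOuter, hnd]
  | succ fuel ih =>
    intro s multiples hlen hpos hnd
    match s with
    | [] => simp [sumMultiplesOuter, hnd]
    | number :: rest =>
      simp only [sumMultiplesOuter]
      have hnum : 1 ≤ number := hpos number (by simp)
      have hfuel : limit ≤ number * (1 + (limit.toNat + 1 : Nat)) := by
        have h1 : (limit : Int) ≤ limit.toNat := Int.self_le_toNat limit
        have h2 : (1 + (limit.toNat + 1 : Nat) : Int) ≤ number * (1 + (limit.toNat + 1 : Nat)) := by
          nlinarith [Int.natCast_nonneg (limit.toNat + 1)]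
        push_cast at h2 ⊢
        omega
      obtain ⟨h1, h2, h3, h4, h5⟩ :=
        innerA_spec limit number hnum (limit.toNat + 1) 1 multiples rest hfuel
      set st := sumMultiplesInner limit number (limit.toNat + 1) 1 (multiples, rest) with hst
      have hlen' : st.2.length ≤ fuel := by
        simp at hlen; omega
      have hpos' : ∀ d ∈ st.2, 1 ≤ d := fun d hd => hpos d (by simp [h3 d hd])
      obtain ⟨g1, g2⟩ := ih st.2 st.1 hlen' hpos' (h1 hnd)
      refine ⟨g1, ?_⟩
      intro n
      rw [g2 n]
      constructor
      · rintro (h | ⟨d, hd, hmlt⟩)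
        · rw [h2 n] at h
          rcases h with h | ⟨k, hk, rfl, hl⟩
          · exact Or.inl h
          · exact Or.inr ⟨number, by simp, k, hk, rfl, hl⟩
        · exact Or.inr ⟨d, by simp [h3 d hd], hmlt⟩
      · rintro (h | ⟨d, hd, k, hk, rfl, hl⟩)
        · exact Or.inl ((h2 _).mpr (Or.inl h))
        · rcases List.mem_cons.mp hd with rfl | hd'
          · exact Or.inl ((h2 _).mpr (Or.inr ⟨k, hk, rfl, hl⟩))
          · by_cases hin : d ∈ st.2
            · exact Or.inr ⟨d, hin, k, hk, rfl, hl⟩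
            · obtain ⟨j, hj, hdj, _⟩ := h4 d hd' hin
              refine Or.inl ((h2 _).mpr (Or.inr ⟨j * k, ?_, by rw [hdj]; ring, hl⟩))
              nlinarith

-- ===== VERDICT (by name: the statement is the Claim_ definition above) =====
theorem sum_multiples_spec : Claim_equal_sum_multiples := by
  intro limit numbers _ hpre
  unfold Spec_sum_multiples
  rw [sum_multiples, sum_multiples_alt, foldl_if_filter, zero_add]
  set p : Int → Bool := fun n => numbers.any (fun d => PySem.Int.mod n d == 0) with hp
  set s := PySem.Set.ofList numbers with hs
  by_cases hlim : limit ≤ 0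
  · rw [outer_drain limit s.length s []
      (fun d hd => by
        rcases hpre d ((PySem.Set.mem_ofList numbers d).mp hd) with h | h <;> omega),
      PySem.List.pyRange_one_eq_nil (by omega : limit ≤ 1)]
    simp
  · have hpos : ∀ d ∈ s, 1 ≤ d := fun d hd => by
      rcases hpre d ((PySem.Set.mem_ofList numbers d).mp hd) with h | h <;> omega
    obtain ⟨g1, g2⟩ := outerA_spec limit s.length s [] (le_refl _) hpos
      (List.nodup_nil)
    have hBnd : ((PySem.List.pyRange 1 limit 1).filter p).Nodup :=
      (PySem.List.nodup_pyRange_one 1 limit).filter _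
    have hperm : (sumMultiplesOuter limit s.length s []).Perm
        ((PySem.List.pyRange 1 limit 1).filter p) := by
      rw [List.perm_ext_iff_of_nodup g1 hBnd]
      intro n
      rw [g2 n, List.mem_filter, PySem.List.mem_pyRange_one]
      simp only [List.not_mem_nil, false_or]
      constructor
      · rintro ⟨d, hd, k, hk, rfl, hl⟩
        have hd1 : 1 ≤ d := hpos d hd
        refine ⟨⟨by nlinarith, hl⟩, ?_⟩
        rw [hp, List.any_eq_true]
        exact ⟨d, (PySem.Set.mem_ofList numbers d).mp hd,
          by rw [beq_iff_eq, PySem.Int.mod_eq_zero_iff_dvd]; exact ⟨k, rfl⟩⟩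
      · rintro ⟨⟨hn1, hnl⟩, hpn⟩
        rw [hp, List.any_eq_true] at hpn
        obtain ⟨d, hd, hmod⟩ := hpn
        rw [beq_iff_eq, PySem.Int.mod_eq_zero_iff_dvd] at hmod
        obtain ⟨k, rfl⟩ := hmod
        have hd1 : 1 ≤ d := hpos d ((PySem.Set.mem_ofList numbers d).mpr hd)
        refine ⟨d, (PySem.Set.mem_ofList numbers d).mpr hd, k, ?_, rfl, hnl⟩
        nlinarith
    exact hperm.sum_eq
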